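-- pv_equiv track=rewrite | github.com/peterlin1/leetcode | algorithms/april_challenge/14_Perform_String_Shifts.py | stringShift
-- ===== SOURCE A (Python) =====
-- def stringShift(s, shift):
--     """
--     You are given a string s containing lowercase English letters, and a matrix shift, where shift[i] = [direction,
--     amount]:
--
--     direction can be 0 (for left shift) or 1 (for right shift).
--     amount is the amount by which string s is to be shifted.
--     A left shift by 1 means remove the first character of s and append it to the end.
--     Similarly, a right shift by 1 means remove the last character of s and add it to the beginning.
--     Return the final string after all operations.
--
--     Constraints:
--     1 <= s.length <= 100
--     s only contains lower case English letters.
--     1 <= shift.length <= 100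
--     shift[i].length == 2
--     0 <= shift[i][0] <= 1
--     0 <= shift[i][1] <= 100
--
--     31 / 31 test cases passed.
--     Status: Accepted
--     Runtime: 36 ms
--     Memory Usage: 13.9 MB
--
--
--     Parameters
--     ----------
--     s : str
--
--     shift : list
--
--
--     Returns
--     -------
--     ret : str
--
--
--     Examples
--     --------
--     >>> Solution().stringShift(s="abc", shift=[[0, 1], [1, 2]])
--     "cab"
--
--     >>> Solution().stringShift(s="abcdefg", shift=[[1, 1], [1, 1], [0, 2], [1, 3]])
--     "efgabcd"
--
--     """
--
--     t_s = 0
--     for sh in shift: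
--         if sh[0] is 0:
--             t_s -= sh[1]
--         else:
--             t_s += sh[1]
--
--     t_s %= len(s)
--     return s[len(s) - t_s:] + s[: len(s) - t_s] if t_s >= 0 else s[-t_s:] + s[: -t_s]
-- ===== SOURCE B (Python) =====
-- def stringShift(s, shift):
--     for sh in shift:
--         amt = sh[1] % len(s)
--         if sh[0] == 0:
--             s = s[amt:] + s[:amt]
--         else:
--             k = len(s) - amt
--             s = s[k:] + s[:k]
--     return s
-- ===== Notes on version B (the rewrite author's own statement) =====
-- stated objective: alternative
-- what changed: B maintains the working string itself and applies every shift operation as an actual slice rotation in turn, instead of A's fold of all operations into one signed net offset followed by a single closing slice.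
import Mathlib
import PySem

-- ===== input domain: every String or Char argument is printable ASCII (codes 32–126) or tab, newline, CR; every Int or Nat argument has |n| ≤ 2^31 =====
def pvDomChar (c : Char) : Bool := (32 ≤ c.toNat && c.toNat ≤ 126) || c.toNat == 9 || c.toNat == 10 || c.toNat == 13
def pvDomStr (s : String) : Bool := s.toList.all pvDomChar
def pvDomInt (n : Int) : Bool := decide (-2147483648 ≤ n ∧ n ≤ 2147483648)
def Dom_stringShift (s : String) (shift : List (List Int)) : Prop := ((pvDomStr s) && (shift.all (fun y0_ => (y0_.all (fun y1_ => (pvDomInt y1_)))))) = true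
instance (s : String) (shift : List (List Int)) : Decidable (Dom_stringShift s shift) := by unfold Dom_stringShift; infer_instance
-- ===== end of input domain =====

-- B applies every shift operation as an actual slice rotation of the working string, instead of
-- A's fold of all operations into one signed net offset and a single closing slice (alternative
-- decomposition, not claimed faster).

-- ===== PORT A =====
def stringShift (s : String) (shift : List (List Int)) : String :=
  let l := s.toList
  let n : Int := (l.length : Int)
  let t_s : Int := shift.foldl (fun t_s sh =>
      if PySem.List.pyGetD sh 0 0 = 0 then t_s - PySem.List.pyGetD sh 1 0
      else t_s + PySem.List.pyGetD sh 1 0) 0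
  let m : Int := PySem.Int.mod t_s n
  if 0 ≤ m then
    String.ofList (PySem.List.slice l (some (n - m)) none ++ PySem.List.slice l none (some (n - m)))
  else
    String.ofList (PySem.List.slice l (some (-m)) none ++ PySem.List.slice l none (some (-m)))

-- ===== PORT B =====
def pvAltStep (cur : List Char) (sh : List Int) : List Char :=
  let amt : Int := PySem.Int.mod (PySem.List.pyGetD sh 1 0) (cur.length : Int)
  if PySem.List.pyGetD sh 0 0 = 0 then
    PySem.List.slice cur (some amt) none ++ PySem.List.slice cur none (some amt)
  else
    let k : Int := (cur.length : Int) - amt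
    PySem.List.slice cur (some k) none ++ PySem.List.slice cur none (some k)

def stringShift_alt (s : String) (shift : List (List Int)) : String :=
  String.ofList (shift.foldl pvAltStep s.toList)

-- ===== PRECONDITION & SPEC =====
-- Pre_ excludes exactly the inputs on which the Python A raises: an empty s (ZeroDivisionError
-- from `% len(s)`) and shift rows shorter than 2 (IndexError); B raises there as well.
def Pre_stringShift (s : String) (shift : List (List Int)) : Prop :=
  0 < s.toList.length ∧ ∀ row ∈ shift, 2 ≤ row.length
instance (s : String) (shift : List (List Int)) : Decidable (Pre_stringShift s shift) := by
  unfold Pre_stringShift; infer_instance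

def pvWitness_stringShift : String × List (List Int) := ("abc", [[0, 1], [1, 2]])

def Spec_stringShift (s : String) (shift : List (List Int)) (out : String) : Prop := out = stringShift_alt s shift
instance (s : String) (shift : List (List Int)) (out : String) : Decidable (Spec_stringShift s shift out) := by unfold Spec_stringShift; infer_instance

-- ===== CLAIM (what is proved, stated in full; the proofs are below) =====
def Claim_equal_stringShift : Prop := ∀ (s : String) (shift : List (List Int)), Dom_stringShift s shift → Pre_stringShift s shift → Spec_stringShift s shift (stringShift s shift)

-- ===== LEMMAS AND PROOFS =====

-- the (nonnegative) left-rotation amount one operation performs on a string of length N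
def pvD (N : Nat) (sh : List Int) : Nat :=
  let amt := (PySem.Int.mod (PySem.List.pyGetD sh 1 0) (N : Int)).toNat
  if PySem.List.pyGetD sh 0 0 = 0 then amt else N - amt

-- the signed amount A adds for one operation
def pvSigned (sh : List Int) : Int :=
  if PySem.List.pyGetD sh 0 0 = 0 then -(PySem.List.pyGetD sh 1 0) else PySem.List.pyGetD sh 1 0

theorem pvAltStep_rotate (cur : List Char) (sh : List Int) (h : 0 < cur.length) :
    pvAltStep cur sh = cur.rotate (pvD cur.length sh) := by
  have hN : (0 : Int) < (cur.length : Int) := by exact_mod_cast h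
  have hmod := PySem.Int.mod_nonneg (PySem.List.pyGetD sh 1 0) hN
  have hlt := PySem.Int.mod_lt (PySem.List.pyGetD sh 1 0) hN
  set a : Int := PySem.Int.mod (PySem.List.pyGetD sh 1 0) (cur.length : Int) with ha
  have hale : a.toNat ≤ cur.length := by omega
  unfold pvAltStep pvD
  rw [← ha]
  dsimp only
  split_ifs with hdir
  · rw [PySem.List.slice_from _ hmod, PySem.List.slice_to _ hmod,
      List.rotate_eq_drop_append_take hale]
  · have hk : (0 : Int) ≤ (cur.length : Int) - a := by omega
    have hk2 : ((cur.length : Int) - a).toNat = cur.length - a.toNat := by omega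
    rw [PySem.List.slice_from _ hk, PySem.List.slice_to _ hk, hk2,
      List.rotate_eq_drop_append_take (by omega)]

theorem pvFoldB (shift : List (List Int)) (l : List Char) (h : 0 < l.length) :
    ∀ j : Nat, shift.foldl pvAltStep (l.rotate j)
      = l.rotate (j + (shift.map (pvD l.length)).sum) := by
  induction shift with
  | nil => intro j; simp
  | cons sh rest ih =>
    intro j
    have hlen : (l.rotate j).length = l.length := List.length_rotate _ _
    simp only [List.foldl_cons, List.map_cons, List.sum_cons]
    rw [pvAltStep_rotate _ sh (by omega), hlen, List.rotate_rotate, ih, Nat.add_assoc]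

theorem pvFoldA (shift : List (List Int)) :
    ∀ t0 : Int, shift.foldl (fun t_s sh =>
      if PySem.List.pyGetD sh 0 0 = 0 then t_s - PySem.List.pyGetD sh 1 0
      else t_s + PySem.List.pyGetD sh 1 0) t0 = t0 + (shift.map pvSigned).sum := by
  induction shift with
  | nil => intro t0; simp
  | cons sh rest ih =>
    intro t0
    simp only [List.foldl_cons, List.map_cons, List.sum_cons, ih, pvSigned]
    split_ifs <;> ring

theorem pvD_zmod (N : Nat) (hN : 0 < N) (sh : List Int) :
    ((pvD N sh : Nat) : ZMod N) = -((pvSigned sh : Int) : ZMod N) := by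
  have hNi : (0 : Int) < (N : Int) := by exact_mod_cast hN
  have hmod := PySem.Int.mod_nonneg (PySem.List.pyGetD sh 1 0) hNi
  have hlt := PySem.Int.mod_lt (PySem.List.pyGetD sh 1 0) hNi
  set a : Int := PySem.Int.mod (PySem.List.pyGetD sh 1 0) (N : Int) with ha
  have hemod : a = PySem.List.pyGetD sh 1 0 % (N : Int) := PySem.Int.mod_eq_emod_of_pos hNi
  have key : ((a.toNat : Nat) : ZMod N) = ((PySem.List.pyGetD sh 1 0 : Int) : ZMod N) := by
    have h1 : ((a.toNat : Int)) = a := Int.toNat_of_nonneg hmod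
    have h2 : ((a.toNat : Nat) : ZMod N) = ((a : Int) : ZMod N) := by
      conv_rhs => rw [← h1]
      push_cast; ring
    rw [h2, hemod]; simp
  unfold pvD pvSigned
  dsimp only
  rw [← ha]
  split_ifs with hdir
  · rw [key]; push_cast; ring
  · have hle : a.toNat ≤ N := by omega
    rw [Nat.cast_sub hle, key, ZMod.natCast_self]; ring

-- ===== VERDICT (by name: the statement is the Claim_ definition above) =====
theorem stringShift_spec : Claim_equal_stringShift := by
  intro s shift _ hpre
  obtain ⟨hlen, hrows⟩ := hpre
  unfold Spec_stringShift stringShift stringShift_alt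
  dsimp only
  set l := s.toList with hldef
  set N := l.length with hNdef
  have hN : 0 < N := hlen
  have hNi : (0 : Int) < (N : Int) := by exact_mod_cast hN
  have hB : shift.foldl pvAltStep l = l.rotate ((shift.map (pvD N)).sum) := by
    have h0 := pvFoldB shift l hN 0
    simpa using h0
  rw [pvFoldA shift 0, zero_add, hB]
  set T : Int := (shift.map pvSigned).sum with hT
  set m : Int := PySem.Int.mod T (N : Int) with hm
  have hm0 : 0 ≤ m := PySem.Int.mod_nonneg T hNi
  have hmlt : m < N := PySem.Int.mod_lt T hNi
  have hemod : m = T % (N : Int) := PySem.Int.mod_eq_emod_of_pos hNi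
  rw [if_pos hm0]
  have ha0 : (0 : Int) ≤ (N : Int) - m := by omega
  rw [PySem.List.slice_from _ ha0, PySem.List.slice_to _ ha0]
  have hle : ((N : Int) - m).toNat ≤ N := by omega
  rw [← List.rotate_eq_drop_append_take hle]
  congr 1
  -- the two rotation amounts agree modulo N
  have hz : ((((N : Int) - m).toNat : Nat) : ZMod N) = (((shift.map (pvD N)).sum : Nat) : ZMod N) := by
    have hL : ((((N : Int) - m).toNat : Nat) : ZMod N) = -((T : Int) : ZMod N) := by
      have h1 : ((((N : Int) - m).toNat : Int)) = (N : Int) - m := Int.toNat_of_nonneg ha0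
      have h2 : ((((N : Int) - m).toNat : Nat) : ZMod N) = (((N : Int) - m : Int) : ZMod N) := by
        conv_rhs => rw [← h1]
        push_cast; ring
      rw [h2, hemod]; push_cast; simp
    have hR : (((shift.map (pvD N)).sum : Nat) : ZMod N) = -((T : Int) : ZMod N) := by
      rw [Nat.cast_list_sum, List.map_map]
      have hmap : shift.map ((Nat.cast : Nat → ZMod N) ∘ pvD N)
          = shift.map (fun sh => -((pvSigned sh : Int) : ZMod N)) :=
        List.map_congr_left (fun sh _ => pvD_zmod N hN sh)
      rw [hmap, hT, Int.cast_list_sum, List.map_map]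
      rw [show (fun sh => -((pvSigned sh : Int) : ZMod N))
            = (Neg.neg ∘ ((Int.cast : Int → ZMod N) ∘ pvSigned)) from rfl,
        ← List.map_map, List.sum_neg, List.map_map]
    rw [hL, hR]
  have hmodeq : (((N : Int) - m).toNat) % N = ((shift.map (pvD N)).sum) % N :=
    (ZMod.natCast_eq_natCast_iff _ _ _).mp hz
  calc l.rotate (((N : Int) - m).toNat)
      = l.rotate ((((N : Int) - m).toNat) % l.length) := (List.rotate_mod _ _).symm
    _ = l.rotate (((shift.map (pvD N)).sum) % l.length) := by rw [← hNdef, hmodeq]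
    _ = l.rotate ((shift.map (pvD N)).sum) := List.rotate_mod _ _
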